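-- pv_equiv track=rewrite | github.com/NWarila/rpm_parser | __main__.py | _sanitize_key
-- ===== SOURCE A (Python) =====
-- def _sanitize_key(path, used):  # type: (str, Set[str]) -> str
--     """
--     Turn a filesystem path into a safe YAML key:
--       - strip leading '/'
--       - lowercase
--       - replace any non-alphanumeric with '_'
--       - collapse consecutive '_' and trim at ends
--       - ensure uniqueness with numeric suffix if needed
--     """
--     s = (path or "").strip()
--     if s.startswith("/"):
--         s = s[1:]
--     s = s.lower()
--
--     out_chars = []
--     prev_underscore = False
--     for ch in s:
--         if ("a" <= ch <= "z") or ("0" <= ch <= "9"):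
--             out_chars.append(ch)
--             prev_underscore = False
--         else:
--             if not prev_underscore:
--                 out_chars.append("_")
--                 prev_underscore = True
--             # else skip additional underscores
--
--     key = "".join(out_chars).strip("_") or "root"
--
--     # Ensure uniqueness
--     if key not in used:
--         used.add(key)
--         return key
--     i = 2
--     while True:
--         candidate = "%s_%d" % (key, i)
--         if candidate not in used:
--             used.add(candidate)
--             return candidate
--         i += 1
-- ===== SOURCE B (Python) =====
-- def _sanitize_key(path, used):  # type: (str, Set[str]) -> str
--     """Same key derivation via two-pointer run extraction and a single unified uniqueness loop."""
--     s = (path or "").strip()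
--     if s.startswith("/"):
--         s = s[1:]
--     s = s.lower()
--
--     words = []
--     i, n = 0, len(s)
--     while i < n:
--         if "a" <= s[i] <= "z" or "0" <= s[i] <= "9":
--             j = i + 1
--             while j < n and ("a" <= s[j] <= "z" or "0" <= s[j] <= "9"):
--                 j += 1
--             words.append(s[i:j])
--             i = j
--         else:
--             i += 1
--
--     key = "_".join(words) or "root"
--
--     cand, i = key, 1
--     while cand in used:
--         i += 1
--         cand = "%s_%d" % (key, i)
--     used.add(cand)
--     return cand
-- ===== Notes on version B (the rewrite author's own statement) =====
-- stated objective: alternative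
-- what changed: The flag-driven character scan (emit-underscore-once + strip at ends) is replaced by two-pointer extraction of alphanumeric runs joined with '_', and A's membership test followed by a separate numbered-suffix loop is unified into a single candidate loop starting at the bare key.
import Mathlib
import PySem

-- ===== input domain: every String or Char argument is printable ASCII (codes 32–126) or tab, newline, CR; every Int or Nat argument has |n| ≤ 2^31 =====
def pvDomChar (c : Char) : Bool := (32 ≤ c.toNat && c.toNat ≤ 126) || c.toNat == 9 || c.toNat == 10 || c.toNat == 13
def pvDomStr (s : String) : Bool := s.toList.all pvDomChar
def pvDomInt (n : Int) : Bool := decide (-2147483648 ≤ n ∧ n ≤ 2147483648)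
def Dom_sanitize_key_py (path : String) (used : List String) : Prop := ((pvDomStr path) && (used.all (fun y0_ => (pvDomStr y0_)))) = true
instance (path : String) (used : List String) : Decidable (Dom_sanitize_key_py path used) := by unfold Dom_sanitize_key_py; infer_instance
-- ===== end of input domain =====

-- B replaces A's flag-driven collapse scan by two-pointer run extraction (token list joined with '_')
-- and unifies A's membership test + numbered-suffix loop into one candidate loop (alternative, same cost).
-- Both Pythons mutate `used` identically (add the returned key); the equivalence proved is about the RETURN value.

-- ===== PORT A =====
-- 'a' <= ch <= 'z' or '0' <= ch <= '9', compared by code point exactly as Python compares characters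
def pvAl (c : Char) : Bool := (97 ≤ c.toNat && c.toNat ≤ 122) || (48 ≤ c.toNat && c.toNat ≤ 57)

-- one step of A's loop; state = (out_chars, prev_underscore)
def pvStepA (st : List Char × Bool) (c : Char) : List Char × Bool :=
  if pvAl c then (st.1 ++ [c], false)
  else if st.2 then st
  else (st.1 ++ ['_'], true)

-- A's `while True` suffix search; fuel = |used| + 1 always suffices because the
-- candidates key_2, key_3, … are pairwise distinct, so the Python loop returns
-- within that many iterations (the fuel-0 default is never reached).
def pvUniqA (key : List Char) (used : List (List Char)) : Nat → Int → List Char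
  | 0, i => key ++ '_' :: PySem.Int.toChars i
  | f+1, i =>
    let cand := key ++ '_' :: PySem.Int.toChars i
    if used.contains cand then pvUniqA key used f (i + 1) else cand

def sanitize_key_py (path : String) (used : List String) : String :=
  let s0 := PySem.Chars.strip path.toList
  let s1 := if PySem.Chars.startswith s0 ['/'] then PySem.List.slice s0 (some 1) none else s0
  let s := PySem.Chars.lower s1
  let out := List.foldl pvStepA ([], false) s
  let key0 := PySem.Chars.stripChars out.1 ['_']
  let key := if key0.isEmpty then ['r','o','o','t'] else key0
  let u := used.map String.toList
  if u.contains key then String.ofList (pvUniqA key u (u.length + 1) 2) else String.ofList key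

-- ===== PORT B =====
-- the same code-point test, B's copy
def pvTok (c : Char) : Bool := (97 ≤ c.toNat && c.toNat ≤ 122) || (48 ≤ c.toNat && c.toNat ≤ 57)

-- B's two-pointer scan: at an alphanumeric position take the whole run (inner j-loop = takeWhile,
-- i = j = dropWhile), otherwise advance one position
def pvWords : List Char → List (List Char)
  | [] => []
  | c :: r =>
    if pvTok c then ((c :: r).takeWhile pvTok) :: pvWords ((c :: r).dropWhile pvTok)
    else pvWords r
termination_by s => s.length
decreasing_by
  · rename_i h
    rw [List.dropWhile_cons, if_pos h]
    exact Nat.lt_succ_of_le (List.dropWhile_sublist _).length_le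
  · simp

-- B's single `while cand in used` loop; state = (cand, i); fuel = |used| + 2 suffices because the
-- candidates key, key_2, …, key_{|used|+2} are pairwise distinct (the fuel-0 default is never reached).
def pvUniqB (key : List Char) (used : List (List Char)) : Nat → List Char → Int → List Char
  | 0, cand, _ => cand
  | f+1, cand, i =>
    if used.contains cand then
      pvUniqB key used f (key ++ '_' :: PySem.Int.toChars (i + 1)) (i + 1)
    else cand

def sanitize_key_py_alt (path : String) (used : List String) : String :=
  let s0 := PySem.Chars.strip path.toList
  let s1 := if PySem.Chars.startswith s0 ['/'] then PySem.List.slice s0 (some 1) none else s0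
  let s := PySem.Chars.lower s1
  let key1 := PySem.Chars.join ['_'] (pvWords s)
  let key := if key1.isEmpty then ['r','o','o','t'] else key1
  let u := used.map String.toList
  String.ofList (pvUniqB key u (u.length + 2) key 1)

-- ===== PRECONDITION & SPEC =====
def Spec_sanitize_key_py (path : String) (used : List String) (out : String) : Prop := out = sanitize_key_py_alt path used
instance (path : String) (used : List String) (out : String) : Decidable (Spec_sanitize_key_py path used out) := by unfold Spec_sanitize_key_py; infer_instance

-- ===== CLAIM (what is proved, stated in full; the proofs are below) =====
def Claim_equal_sanitize_key_py : Prop := ∀ (path : String) (used : List String), Dom_sanitize_key_py path used → Spec_sanitize_key_py path used (sanitize_key_py path used)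

-- ===== LEMMAS AND PROOFS =====

-- B's loop, already standing at candidate key_i, is A's loop from i
theorem pvUniq_shift (key : List Char) (used : List (List Char)) :
    ∀ (f : Nat) (i : Int),
      pvUniqB key used f (key ++ '_' :: PySem.Int.toChars i) i = pvUniqA key used f i := by
  intro f
  induction f with
  | zero => intro i; rfl
  | succ f ih => intro i; simp only [pvUniqA, pvUniqB, ih]

-- clean emit-style form of A's scan
def pvEmit : List Char → Bool → List Char
  | [], _ => []
  | c :: r, prev =>
    if pvAl c then c :: pvEmit r false
    else if prev then pvEmit r true
    else '_' :: pvEmit r true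

theorem pvFoldl_stepA : ∀ (s : List Char) (acc : List Char) (prev : Bool),
    (List.foldl pvStepA (acc, prev) s).1 = acc ++ pvEmit s prev := by
  intro s
  induction s with
  | nil => intro acc prev; simp [pvEmit]
  | cons c r ih =>
    intro acc prev
    by_cases h : pvAl c = true
    · simp [pvStepA, pvEmit, h, ih]
    · cases prev <;> simp [pvStepA, pvEmit, h, ih]

-- the predicate stripChars ['_'] uses
def pvP (c : Char) : Bool := ['_'].contains c

-- strip only at the right end
def pvRS (w : List Char) : List Char := (List.dropWhile pvP w.reverse).reverse

-- A-style tokenizer with an explicit current-word accumulator, the bridge between pvEmit and pvWords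
def pvJ : List Char → List Char → List (List Char)
  | [], cur => if cur.isEmpty then [] else [cur.reverse]
  | c :: r, cur =>
    if pvAl c then pvJ r (c :: cur)
    else if cur.isEmpty then pvJ r cur
    else cur.reverse :: pvJ r []

theorem pvP_iff (c : Char) : pvP c = true ↔ c = '_' := by
  simp [pvP, eq_comm]

theorem pvAl_not_p {c : Char} (h : pvAl c = true) : pvP c = false := by
  by_cases h' : pvP c = true
  · exfalso
    have hc : c = '_' := (pvP_iff c).mp h'
    subst hc
    simp [pvAl] at h
  · exact Bool.not_eq_true _ ▸ (Bool.eq_false_iff.mpr h')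

-- B's span recursion computes exactly the accumulator tokenizer started empty
theorem pvJ_eq_words : ∀ (s cur : List Char),
    pvJ s cur = if cur.isEmpty then pvWords s
                else (cur.reverse ++ s.takeWhile pvAl) :: pvWords (s.dropWhile pvAl) := by
  intro s
  induction s with
  | nil =>
    intro cur
    by_cases h : cur.isEmpty <;> simp [pvJ, pvWords, h]
  | cons c r ih =>
    intro cur
    by_cases h : pvAl c = true
    · have ht : pvTok c = true := h
      by_cases hc : cur.isEmpty
      · have hcur : cur = [] := List.isEmpty_iff.mp hc
        subst hcur
        simp only [pvJ, h, if_true, ih, List.isEmpty_nil, List.isEmpty_cons,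
          Bool.false_eq_true, if_false, if_true]
        simp only [pvWords, ht, if_true, List.takeWhile_cons, List.dropWhile_cons]
        rfl
      · simp only [pvJ, h, if_true, ih, List.isEmpty_cons, Bool.false_eq_true, if_false, hc]
        simp only [List.takeWhile_cons, List.dropWhile_cons, h, if_true]
        simp
    · have ha : pvAl c = false := Bool.eq_false_iff.mpr h
      have ht : pvTok c = false := ha
      by_cases hc : cur.isEmpty
      · simp only [pvJ, h, Bool.false_eq_true, if_false, hc, if_true, ih]
        simp only [pvWords, ht, Bool.false_eq_true, if_false]
      · simp only [pvJ, h, Bool.false_eq_true, if_false, hc, ih, List.isEmpty_nil, if_true]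
        simp only [List.takeWhile_cons, List.dropWhile_cons, h, Bool.false_eq_true, if_false]
        simp only [pvWords, ht, Bool.false_eq_true, if_false]
        simp

theorem pvWords_eq (s : List Char) : pvWords s = pvJ s [] := by
  rw [pvJ_eq_words]; simp

-- every token pvJ produces is nonempty
theorem pvJ_ne_nil : ∀ (s cur t : List Char), t ∈ pvJ s cur → t ≠ [] := by
  intro s
  induction s with
  | nil =>
    intro cur t ht
    simp only [pvJ] at ht
    by_cases h : cur.isEmpty
    · simp [h] at ht
    · simp only [h, Bool.false_eq_true, if_false, List.mem_singleton] at ht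
      subst ht
      intro hc
      apply h
      cases cur <;> simp_all
  | cons c r ih =>
    intro cur t ht
    simp only [pvJ] at ht
    by_cases h : pvAl c = true
    · rw [if_pos h] at ht; exact ih _ _ ht
    · rw [if_neg h] at ht
      by_cases hc : cur.isEmpty
      · rw [if_pos hc] at ht; exact ih _ _ ht
      · rw [if_neg hc] at ht
        rcases List.mem_cons.mp ht with h1 | h2
        · subst h1
          intro hcc
          apply hc
          cases cur <;> simp_all
        · exact ih _ _ h2

theorem pvRS_cons_ne {c : Char} (h : pvP c = false) (w : List Char) :
    pvRS (c :: w) = c :: pvRS w := by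
  simp only [pvRS, List.reverse_cons, List.dropWhile_append]
  by_cases he : (List.dropWhile pvP w.reverse).isEmpty
  · rw [if_pos he]
    rw [List.isEmpty_iff] at he
    rw [he]
    simp [h]
  · rw [if_neg he]
    simp

theorem pvRS_underscore (w : List Char) :
    pvRS ('_' :: w) = if (pvRS w).isEmpty then [] else '_' :: pvRS w := by
  have hp : pvP '_' = true := by decide
  simp only [pvRS, List.reverse_cons, List.dropWhile_append]
  by_cases he : (List.dropWhile pvP w.reverse).isEmpty
  · rw [if_pos he]
    rw [List.isEmpty_iff] at he
    rw [he]
    simp [hp]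
  · rw [if_neg he]
    have he' : List.dropWhile pvP w.reverse ≠ [] := by
      simpa [List.isEmpty_iff] using he
    have h2 : ((List.dropWhile pvP w.reverse).reverse).isEmpty = false := by
      simpa [List.isEmpty_iff, List.reverse_eq_nil_iff] using he'
    rw [if_neg (by simp [h2])]
    simp

theorem pvEmit_true_clean (s : List Char) :
    List.dropWhile pvP (pvEmit s true) = pvEmit s true := by
  induction s with
  | nil => simp [pvEmit]
  | cons c r ih =>
    by_cases h : pvAl c = true
    · simp [pvEmit, h, pvAl_not_p h]
    · simp [pvEmit, h, ih]

-- intercalate over a cons, with the tail possibly empty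
theorem pvIntercalate_cons (sep a : List Char) (ts : List (List Char)) :
    List.intercalate sep (a :: ts) =
      a ++ (if ts.isEmpty then [] else sep ++ List.intercalate sep ts) := by
  cases ts <;> simp [List.intercalate]

-- core invariants: P1 (inside a word, cur ≠ []) and P2 (at a word boundary)
theorem pvP12 : ∀ (s : List Char),
    (∀ cur : List Char, cur ≠ [] →
      List.intercalate ['_'] (pvJ s cur) = cur.reverse ++ pvRS (pvEmit s false)) ∧
    List.intercalate ['_'] (pvJ s []) = pvRS (pvEmit s true) := by
  intro s
  induction s with
  | nil =>
    constructor
    · intro cur hcur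
      have : cur.isEmpty = false := by cases cur <;> simp_all
      simp [pvJ, pvEmit, pvRS, this, List.intercalate]
    · simp [pvJ, pvEmit, pvRS, List.intercalate]
  | cons c r ih =>
    obtain ⟨ih1, ih2⟩ := ih
    by_cases h : pvAl c = true
    · constructor
      · intro cur hcur
        have hne : c :: cur ≠ [] := by simp
        have := ih1 (c :: cur) hne
        simp only [pvJ, pvEmit, h, if_true, this, pvRS_cons_ne (pvAl_not_p h)]
        simp
      · have := ih1 [c] (by simp)
        simp only [pvJ, pvEmit, h, if_true, this, pvRS_cons_ne (pvAl_not_p h)]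
        simp
    · constructor
      · intro cur hcur
        have hc : cur.isEmpty = false := by cases cur <;> simp_all
        simp only [pvJ, pvEmit, h, Bool.false_eq_true, if_false, hc]
        rw [pvIntercalate_cons, pvRS_underscore, ← ih2]
        by_cases hts : (pvJ r ([] : List Char)).isEmpty
        · have hJ : pvJ r ([] : List Char) = [] := List.isEmpty_iff.mp hts
          simp [hJ, List.intercalate]
        · have hne : List.intercalate ['_'] (pvJ r []) ≠ [] := by
            rcases List.exists_cons_of_ne_nil (by simpa using hts) with ⟨t, ts, hJ⟩
            rw [hJ, pvIntercalate_cons]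
            have ht : t ≠ [] := pvJ_ne_nil r [] t (by rw [hJ]; exact List.mem_cons_self ..)
            intro habs
            rcases List.append_eq_nil_iff.mp habs with ⟨h1, _⟩
            exact ht h1
          have hie : (List.intercalate ['_'] (pvJ r [])).isEmpty = false := by
            cases hx : List.intercalate ['_'] (pvJ r []) <;> simp_all
          simp [hts, hie]
      · simp only [pvJ, pvEmit, h, Bool.false_eq_true, if_false, List.isEmpty_nil, if_true]
        exact ih2

-- the two key computations agree on every character list
theorem pvKey_eq (s : List Char) :
    PySem.Chars.stripChars (List.foldl pvStepA (([] : List Char), false) s).1 ['_'] =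
      PySem.Chars.join ['_'] (pvWords s) := by
  rw [pvFoldl_stepA s [] false, List.nil_append, pvWords_eq]
  show PySem.Chars.stripChars (pvEmit s false) ['_'] = List.intercalate ['_'] (pvJ s [])
  have hstrip : ∀ w : List Char,
      PySem.Chars.stripChars w ['_'] = pvRS (List.dropWhile pvP w) := by
    intro w; rfl
  rw [hstrip]
  cases s with
  | nil => simp [pvEmit, pvJ, pvRS, List.intercalate]
  | cons c r =>
    by_cases h : pvAl c = true
    · have h1 := (pvP12 r).1 [c] (by simp)
      simp only [pvEmit, h, if_true, pvJ, List.dropWhile, pvAl_not_p h]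
      rw [pvRS_cons_ne (pvAl_not_p h), h1]
      simp
    · have h2 := (pvP12 r).2
      simp only [pvEmit, h, Bool.false_eq_true, if_false, pvJ, List.isEmpty_nil, if_true,
        List.dropWhile]
      have hp : pvP '_' = true := by decide
      rw [hp]
      rw [pvEmit_true_clean r, h2]

-- B's whole uniqueness phase equals A's test-then-loop phase
theorem pvUniq_eq (key : List Char) (u : List (List Char)) :
    pvUniqB key u (u.length + 2) key 1 =
      if u.contains key then pvUniqA key u (u.length + 1) 2 else key := by
  show (if u.contains key then
          pvUniqB key u (u.length + 1) (key ++ '_' :: PySem.Int.toChars (1 + 1)) (1 + 1)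
        else key) = _
  by_cases h : u.contains key
  · rw [if_pos h, if_pos h]
    have h2 : (1 : Int) + 1 = 2 := by norm_num
    rw [h2, pvUniq_shift]
  · rw [if_neg h, if_neg h]

-- ===== VERDICT (by name: the statement is the Claim_ definition above) =====
theorem sanitize_key_py_spec : Claim_equal_sanitize_key_py := by
  intro path used _
  show sanitize_key_py path used = sanitize_key_py_alt path used
  simp only [sanitize_key_py, sanitize_key_py_alt]
  rw [pvKey_eq, pvUniq_eq]
  conv_rhs => rw [apply_ite String.ofList]
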